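-- pv_equiv track=rewrite | github.com/WalkingBread/olimpiada-informatyczna-2023 | czat.py | next_letter
-- ===== SOURCE A (Python) =====
-- def next_letter(text, k):
--     suffix = text[len(text) - k:]
--     occurences = {}
--     for i in range(len(text)-k):
--         if text[i:i+k] == suffix:
--             c = text[i+k]
--             if c in occurences:
--                 occurences[c] += 1
--             else:
--                 occurences[c] = 1
--     max_oc = 0
--     max_lt = 'a'
--     for letter in occurences.keys():
--         oc = occurences[letter]
--         if (oc > max_oc) or (oc == max_oc and letter < max_lt):
--             max_lt = letter
--             max_oc = oc
--     return max_lt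
-- ===== SOURCE B (Python) =====
-- def next_letter(text, k):
--     # Column-wise matching: keep a candidate-position list and refine it once
--     # per suffix character (instead of comparing a fresh k-slice at every
--     # position); then pick the answer with min over the distinct next chars
--     # keyed by (-count, char).
--     n = len(text)
--     cand = range(n - k)
--     for j, sj in enumerate(text[n - k:]):
--         cand = [i for i in cand if text[i + j] == sj]
--     nexts = [text[i + k] for i in cand]
--     if not nexts:
--         return 'a'
--     return min(set(nexts), key=lambda c: (-nexts.count(c), c))
-- ===== Notes on version B (the rewrite author's own statement) =====
-- stated objective: alternative
-- what changed: B matches column-wise: it keeps one candidate-position list and refines it with one pass per suffix character (so the per-position k-slice comparison disappears), then picks the winner with min over the distinct next chars keyed by (-count, char) instead of A's dict-building plus insertion-order scan with a tie-break branch.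
-- outside the precondition, e.g. on next_letter('bc', -1): A returns 'b', B returns 'c'; on next_letter('', -1): A raises IndexError, B raises IndexError
import Mathlib
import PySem

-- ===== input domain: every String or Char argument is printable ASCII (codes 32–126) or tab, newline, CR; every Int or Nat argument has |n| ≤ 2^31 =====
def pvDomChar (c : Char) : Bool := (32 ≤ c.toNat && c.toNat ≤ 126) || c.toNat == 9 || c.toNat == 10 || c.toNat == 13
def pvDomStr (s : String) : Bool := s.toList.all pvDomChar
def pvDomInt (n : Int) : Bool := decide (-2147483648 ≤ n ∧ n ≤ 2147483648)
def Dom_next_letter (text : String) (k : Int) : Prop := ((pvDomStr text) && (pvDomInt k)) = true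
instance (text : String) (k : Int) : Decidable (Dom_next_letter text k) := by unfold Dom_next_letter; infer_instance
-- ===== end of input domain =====

-- B matches column-wise: it refines one candidate-position list once per suffix character instead of
-- comparing a fresh k-slice at every position, and selects the answer by min over the distinct next
-- chars keyed by (-count, char) (objective: alternative algorithm, similar cost).

-- ===== PORT A =====
def next_letter (text : String) (k : Int) : String :=
  let t := text.toList
  let n : Int := t.length
  let suffix := PySem.List.slice t (some (n - k)) none
  let occ := (PySem.List.pyRange 0 (n - k) 1).foldl
    (fun (occ : PySem.Dict Char Int) i =>
      if PySem.List.slice t (some i) (some (i + k)) = suffix then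
        let c := PySem.List.pyGetD t (i + k) 'a'   -- text[i+k]; in range whenever A returns (Pre_)
        if occ.contains c then occ.insert c (occ.getD c 0 + 1) else occ.insert c 1
      else occ) PySem.Dict.empty
  let best := occ.keys.foldl
    (fun (s : Char × Int) letter =>
      let oc := occ.getD letter 0
      if oc > s.2 ∨ (oc = s.2 ∧ letter < s.1) then (letter, oc) else s) ('a', 0)
  String.ofList [best.1]

-- ===== PORT B =====
def next_letter_alt (text : String) (k : Int) : String :=
  let t := text.toList
  let n : Int := t.length
  let cand0 := PySem.List.pyRange 0 (n - k) 1
  let cand := (PySem.List.enumerate (PySem.List.slice t (some (n - k)) none)).foldl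
    (fun (cand : List Int) p =>
      cand.filter (fun i => PySem.List.pyGetD t (i + p.1) 'a' == p.2)) cand0   -- text[i+j]; in range whenever kept (Pre_)
  let nexts := cand.map (fun i => PySem.List.pyGetD t (i + k) 'a')
  if nexts.isEmpty then "a"
  else
    match PySem.List.min2? (PySem.Set.ofList nexts)
        (fun c => -(PySem.List.count nexts c : Int)) (fun c => c) with
    | some c => String.ofList [c]
    | none => "a"

-- ===== PRECONDITION & SPEC =====
-- Pre_ excludes k < 0: there the negative slice/index bounds wrap around accidentally and A either
-- raises IndexError (e.g. ("", -1)) or returns an artefact of negative-index wraparound.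
def Pre_next_letter (text : String) (k : Int) : Prop := 0 ≤ k
instance (text : String) (k : Int) : Decidable (Pre_next_letter text k) := by unfold Pre_next_letter; infer_instance
def pvWitness_next_letter : String × Int := ("abcab", 2)

def Spec_next_letter (text : String) (k : Int) (out : String) : Prop := out = next_letter_alt text k
instance (text : String) (k : Int) (out : String) : Decidable (Spec_next_letter text k out) := by unfold Spec_next_letter; infer_instance

-- ===== CLAIM (what is proved, stated in full; the proofs are below) =====
def Claim_equal_next_letter : Prop := ∀ (text : String) (k : Int), Dom_next_letter text k → Pre_next_letter text k → Spec_next_letter text k (next_letter text k)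

-- ===== LEMMAS AND PROOFS =====

-- the char A/B count at match position i, and the match test at position i in drop/take form
def nlKey (t : List Char) (kk : Nat) (i : Nat) : Char := t.getD (i + kk) 'a'
def nlP (t suffix : List Char) (kk : Nat) (i : Nat) : Bool := decide (List.take kk (List.drop i t) = suffix)

theorem nl_getD_zero (d : PySem.Dict Char Int) (c : Char) (h : d.contains c = false) : d.getD c 0 = 0 := by
  rw [PySem.Dict.contains_eq_isSome_get?] at h
  unfold PySem.Dict.getD
  cases hg : d.get? c with
  | none => simp
  | some v => rw [hg] at h; simp at h

theorem nl_stepAB (occ : PySem.Dict Char Int) (c : Char) :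
    (if occ.contains c then occ.insert c (occ.getD c 0 + 1) else occ.insert c 1)
      = occ.insert c (occ.getD c 0 + 1) := by
  by_cases h : occ.contains c = true
  · simp [h]
  · simp only [eq_false_of_ne_true h, nl_getD_zero occ c (eq_false_of_ne_true h)]
    norm_num

-- A's counting loop produces the Counter of the next-chars at the matching positions
theorem nl_A_dict (t : List Char) (kk : Nat) (hk : kk ≤ t.length) :
    (PySem.List.pyRange 0 ((t.length : Int) - (kk : Int)) 1).foldl
      (fun (occ : PySem.Dict Char Int) i =>
        if PySem.List.slice t (some i) (some (i + (kk : Int)))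
            = List.drop (t.length - kk) t then
          let c := PySem.List.pyGetD t (i + (kk : Int)) 'a'
          if occ.contains c then occ.insert c (occ.getD c 0 + 1) else occ.insert c 1
        else occ) PySem.Dict.empty
    = PySem.Dict.counter (((List.range (t.length - kk)).filter
        (nlP t (t.drop (t.length - kk)) kk)).map (nlKey t kk)) := by
  have h2 : ((t.length : Int) - (kk : Int) - 0).toNat = t.length - kk := by omega
  rw [PySem.List.pyRange_one, h2, List.foldl_map]
  rw [PySem.List.foldl_congr_mem _ _
    (fun (occ : PySem.Dict Char Int) i =>
      if nlP t (t.drop (t.length - kk)) kk i = true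
      then occ.insert (nlKey t kk i) (occ.getD (nlKey t kk i) 0 + 1) else occ) _ ?hc]
  case hc =>
    intro occ i hi
    simp only [zero_add]
    rw [PySem.List.slice_natCast_add]
    have hcast : (i : Int) + (kk : Int) = ((i + kk : Nat) : Int) := by push_cast; ring
    rw [hcast, PySem.List.pyGetD_natCast, nl_stepAB]
    unfold nlP nlKey
    simp only [decide_eq_true_eq]
  rw [PySem.List.foldl_if_eq_foldl_filter]
  rw [← List.foldl_map (f := nlKey t kk) (g := fun (d : PySem.Dict Char Int) c => d.insert c (d.getD c 0 + 1))]
  exact PySem.Dict.foldl_insert_getD_add_one_eq_counter _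

-- B's staged filtering is one filter by the conjunction of the per-column tests
theorem nl_fold_filter {α β : Type} (q : β → α → Bool) :
    ∀ (l : List β) (c0 : List α),
      l.foldl (fun c p => c.filter (q p)) c0 = c0.filter (fun i => l.all (fun p => q p i)) := by
  intro l
  induction l with
  | nil => intro c0; simp
  | cons p l ih =>
    intro c0
    simp only [List.foldl_cons, ih, List.filter_filter, List.all_cons]
    exact List.filter_congr (fun a _ => by rw [Bool.and_comm])

-- the per-candidate column test equals the slice test
theorem nl_all_eq_nlP (t : List Char) (kk : Nat) (hk : kk ≤ t.length)
    (i : Nat) (hi : i < t.length - kk) :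
    (PySem.List.enumerate (t.drop (t.length - kk))).all
        (fun p => PySem.List.pyGetD t ((i : Nat) + p.1) 'a' == p.2)
      = nlP t (t.drop (t.length - kk)) kk i := by
  have hsl : (t.drop (t.length - kk)).length = kk := by rw [List.length_drop]; omega
  apply Bool.eq_iff_iff.mpr
  simp only [List.all_eq_true, nlP, decide_eq_true_eq, beq_iff_eq]
  have hget : ∀ j : Nat, PySem.List.pyGetD t ((i : Int) + ((0 : Int) + (j : Int))) 'a'
      = t.getD (i + j) 'a' := by
    intro j
    have hc : ((i : Int) + ((0 : Int) + (j : Int))) = ((i + j : Nat) : Int) := by push_cast; ring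
    rw [hc, PySem.List.pyGetD_natCast]
  constructor
  · intro h
    apply List.ext_getElem
    · rw [List.length_take, List.length_drop, hsl]; omega
    · intro j h1 h2
      have hj : j < kk := by
        rw [List.length_take, List.length_drop] at h1; omega
      have hjs : j < (t.drop (t.length - kk)).length := by omega
      have hm : ((0 : Int) + (j : Int), (t.drop (t.length - kk))[j])
          ∈ PySem.List.enumerate (t.drop (t.length - kk)) := by
        rw [PySem.List.mem_enumerate_iff]
        exact ⟨j, hjs, rfl⟩
      have := h _ hm
      simp only [hget j] at this
      have hij : i + j < t.length := by omega
      rw [List.getD_eq_getElem t 'a' hij] at this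
      rw [List.getElem_take, List.getElem_drop]
      exact this
  · intro h p hp
    rw [PySem.List.mem_enumerate_iff] at hp
    obtain ⟨j, hj, rfl⟩ := hp
    simp only [hget j]
    have hjk : j < kk := by omega
    have hij : i + j < t.length := by omega
    rw [List.getD_eq_getElem t 'a' hij]
    have h2 := congrArg (fun l => l.getD j 'a') h
    simp only at h2
    rw [List.getD_eq_getElem _ 'a' (by rw [List.length_take, List.length_drop]; omega),
        List.getD_eq_getElem _ 'a' (by omega)] at h2
    rw [List.getElem_take, List.getElem_drop] at h2
    exact h2

-- B's candidate pipeline produces exactly the next-chars at the matching positions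
theorem nl_B_nexts (t : List Char) (kk : Nat) (hk : kk ≤ t.length) :
    ((PySem.List.enumerate (t.drop (t.length - kk))).foldl
        (fun (cand : List Int) p =>
          cand.filter (fun i => PySem.List.pyGetD t (i + p.1) 'a' == p.2))
        (PySem.List.pyRange 0 ((t.length : Int) - (kk : Int)) 1)).map
      (fun i => PySem.List.pyGetD t (i + (kk : Int)) 'a')
    = ((List.range (t.length - kk)).filter (nlP t (t.drop (t.length - kk)) kk)).map (nlKey t kk) := by
  have h0 : ((t.length : Int) - (kk : Int) - 0).toNat = t.length - kk := by omega
  rw [PySem.List.pyRange_one, h0, nl_fold_filter, List.filter_map, List.map_map]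
  rw [List.filter_congr (q := nlP t (t.drop (t.length - kk)) kk) (fun i hi => by
    have hi' : i < t.length - kk := List.mem_range.mp hi
    simp only [Function.comp_apply, zero_add]
    exact nl_all_eq_nlP t kk hk i hi')]
  apply List.map_congr_left
  intro i _
  simp only [Function.comp_apply, zero_add]
  have hc : ((i : Int) + (kk : Int)) = ((i + kk : Nat) : Int) := by push_cast; ring
  rw [hc, PySem.List.pyGetD_natCast]
  rfl

-- the fold inside PySem.List.min2? for B's key pair
def nlF (cnt : Char → Int) : Option Char → Char → Option Char := fun acc x =>
  match acc with
  | none => some x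
  | some m =>
    if (decide (-(cnt x) < -(cnt m)) || (!decide (-(cnt m) < -(cnt x)) && decide (x < m))) = true
    then some x else some m

theorem nlF_some (cnt : Char → Int) (m x : Char) :
    nlF cnt (some m) x
      = if (decide (-(cnt x) < -(cnt m)) || (!decide (-(cnt m) < -(cnt x)) && decide (x < m))) = true
        then some x else some m := rfl

theorem nl_min2_eq (cnt : Char → Int) (l : List Char) :
    PySem.List.min2? l (fun c => -(cnt c)) (fun c => c) = l.foldl (nlF cnt) none := by
  show List.foldl _ none l = List.foldl (nlF cnt) none l
  congr 1
  funext acc x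
  cases acc <;> rfl

theorem nl_cond_iff (a b : Int) (x m : Char) :
    ((decide (-a < -b) || (!decide (-b < -a) && decide (x < m))) = true) ↔ (a > b ∨ (a = b ∧ x < m)) := by
  simp only [Bool.or_eq_true, Bool.and_eq_true, decide_eq_true_eq, Bool.not_eq_true',
    decide_eq_false_iff_not]
  constructor
  · rintro (h | ⟨h1, h2⟩)
    · left; omega
    · by_cases hab : a = b
      · exact Or.inr ⟨hab, h2⟩
      · left; omega
  · rintro (h | ⟨h1, h2⟩)
    · left; omega
    · exact Or.inr ⟨by omega, h2⟩

theorem nl_fold_some (cnt : Char → Int) :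
    ∀ (l : List Char) (m : Char), l.foldl (nlF cnt) (some m) = some ((l.foldl (nlF cnt) (some m)).getD m) := by
  intro l
  induction l with
  | nil => intro m; rfl
  | cons x l ih =>
    intro m
    simp only [List.foldl_cons, nlF_some]
    split_ifs with h
    · rw [ih x]; simp
    · exact ih m

-- A's running (best, count) scan equals min2?'s fold, state by state
theorem nl_sel_ind (cnt : Char → Int) :
    ∀ (l : List Char) (m : Char),
      l.foldl (fun (s : Char × Int) c =>
          if cnt c > s.2 ∨ (cnt c = s.2 ∧ c < s.1) then (c, cnt c) else s) (m, cnt m)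
      = ((l.foldl (nlF cnt) (some m)).getD m,
         cnt ((l.foldl (nlF cnt) (some m)).getD m)) := by
  intro l
  induction l with
  | nil => intro m; rfl
  | cons x l ih =>
    intro m
    simp only [List.foldl_cons, nlF_some]
    rw [if_congr (nl_cond_iff (cnt x) (cnt m) x m) rfl rfl]
    by_cases h : cnt x > cnt m ∨ (cnt x = cnt m ∧ x < m)
    · rw [if_pos h, if_pos h, ih x, nl_fold_some cnt l x]
      simp
    · rw [if_neg h, if_neg h, ih m]

theorem nlF_none (cnt : Char → Int) (x : Char) : nlF cnt none x = some x := rfl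

-- A's insertion-order best scan over the counter keys = B's min over the distinct chars
theorem nl_sel_main (NX : List Char) :
    String.ofList [((PySem.Set.ofList NX).foldl
        (fun (s : Char × Int) letter =>
          if ((List.count letter NX : Int)) > s.2 ∨ (((List.count letter NX : Int)) = s.2 ∧ letter < s.1)
          then (letter, ((List.count letter NX : Int))) else s) ('a', 0)).1]
    = (if NX.isEmpty then "a"
       else match PySem.List.min2? (PySem.Set.ofList NX)
           (fun c => -((List.count c NX : Int))) (fun c => c) with
         | some c => String.ofList [c]
         | none => "a") := by
  by_cases hNe : NX = []
  · subst hNe; rfl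
  · rw [if_neg (by simp [hNe])]
    have hcnt : (fun c => -((List.count c NX : Int))) = fun c => -((fun c => (List.count c NX : Int)) c) := rfl
    rw [hcnt, nl_min2_eq (fun c => (List.count c NX : Int))]
    obtain ⟨m, rest, hlm⟩ : ∃ m rest, PySem.Set.ofList NX = m :: rest := by
      cases hset : PySem.Set.ofList NX with
      | nil =>
        exfalso
        obtain ⟨x, hx⟩ := List.exists_mem_of_ne_nil NX hNe
        have := (PySem.Set.mem_ofList NX x).mpr hx
        rw [hset] at this
        simp at this
      | cons m rest => exact ⟨m, rest, rfl⟩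
    rw [hlm]
    have hm : m ∈ NX := (PySem.Set.mem_ofList NX m).mp (hlm ▸ List.mem_cons_self)
    have hc : 1 ≤ (List.count m NX : Int) := by exact_mod_cast List.count_pos_iff.mpr hm
    simp only [List.foldl_cons, nlF_none]
    rw [if_pos (Or.inl (by omega))]
    rw [nl_sel_ind (fun c => (List.count c NX : Int)) rest m]
    rw [nl_fold_some (fun c => (List.count c NX : Int)) rest m]
    rfl

-- ===== VERDICT (by name: the statement is the Claim_ definition above) =====
theorem next_letter_spec : Claim_equal_next_letter := by
  intro text k hdom hpre
  have hpre' : (0:Int) ≤ k := hpre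
  unfold Spec_next_letter
  simp only [next_letter, next_letter_alt]
  set t := text.toList with ht
  by_cases hlt : k < (t.length : Int)
  · set kk := k.toNat with hkk
    have hkcast : (kk : Int) = k := Int.toNat_of_nonneg hpre'
    have hk : kk ≤ t.length := by omega
    rw [← hkcast]
    have hsuf : PySem.List.slice t (some ((t.length : Int) - (kk : Int))) none = t.drop (t.length - kk) := by
      rw [PySem.List.slice_from t (by omega)]
      congr 1
      omega
    rw [hsuf, nl_A_dict t kk hk, nl_B_nexts t kk hk]
    simp only [PySem.Dict.keys_counter, PySem.Dict.getD_counter, PySem.List.count_eq]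
    exact nl_sel_main _
  · rw [PySem.List.pyRange_one_eq_nil (by omega)]
    rw [nl_fold_filter]
    simp only [List.foldl_nil, List.filter_nil, List.map_nil]
    rfl
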